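-- pv_equiv track=rewrite | github.com/bshepp/3body-poisson-algebra | aws_level4.py | enumerate_level4_pairs
-- ===== SOURCE A (Python) =====
-- def enumerate_level4_pairs(all_levels):
--     frontier = [i for i, lv in enumerate(all_levels) if lv == 3]
--     n_existing = len(all_levels)
--
--     computed = set()
--     for i in range(n_existing):
--         for j in range(i + 1, n_existing):
--             if all_levels[i] + all_levels[j] <= 3:
--                 computed.add(frozenset({i, j}))
--
--     pairs = []
--     for i in frontier:
--         for j in range(n_existing):
--             if i == j:
--                 continue
--             pair = frozenset({i, j})
--             if pair in computed:
--                 continue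
--             computed.add(pair)
--             pairs.append((min(i, j), max(i, j)))
--
--     return pairs
-- ===== SOURCE B (Python) =====
-- def enumerate_level4_pairs(all_levels):
--     n = len(all_levels)
--     seen = set()
--     pairs = []
--     for i, lv in enumerate(all_levels):
--         if lv != 3:
--             continue
--         for j in range(n):
--             if j == i or all_levels[j] <= 0:
--                 continue
--             p = (i, j) if i < j else (j, i)
--             if p in seen:
--                 continue
--             seen.add(p)
--             pairs.append(p)
--     return pairs
-- ===== Notes on version B (the rewrite author's own statement) =====
-- stated objective: faster
-- what changed: B drops A's O(n^2) prebuilt set of all low-sum pairs: since a frontier index has level 3, the 'already computed' test reduces to all_levels[j] <= 0, so B does one pass over frontier-by-n with only a seen-set of emitted pairs.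
import Mathlib
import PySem

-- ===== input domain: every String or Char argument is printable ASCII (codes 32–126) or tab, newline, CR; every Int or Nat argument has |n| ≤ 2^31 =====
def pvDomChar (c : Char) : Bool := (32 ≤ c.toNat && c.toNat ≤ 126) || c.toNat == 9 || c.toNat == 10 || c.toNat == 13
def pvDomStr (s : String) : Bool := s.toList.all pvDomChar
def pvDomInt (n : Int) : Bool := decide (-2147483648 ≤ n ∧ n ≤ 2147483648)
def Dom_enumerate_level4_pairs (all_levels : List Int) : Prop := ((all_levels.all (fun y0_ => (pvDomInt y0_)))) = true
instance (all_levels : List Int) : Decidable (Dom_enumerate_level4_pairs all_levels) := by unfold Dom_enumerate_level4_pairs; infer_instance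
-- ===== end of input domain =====

-- B replaces A's O(n^2) prebuild of all low-sum pairs by an inline all_levels[j] <= 0 test plus a seen-set (faster).

-- ===== PORT A =====
def enumerate_level4_pairs (all_levels : List Int) : List (Int × Int) :=
  let frontier : List Int :=
    ((PySem.List.enumerate all_levels).filter (fun p => p.2 == 3)).map (fun p => p.1)
  let n : Int := PySem.List.len all_levels
  let computed : PySem.Set (Int × Int) :=
    (PySem.List.pyRange 0 n 1).foldl (fun c i =>
      (PySem.List.pyRange (i+1) n 1).foldl (fun c j =>
        if PySem.List.pyGetD all_levels i 0 + PySem.List.pyGetD all_levels j 0 ≤ 3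
        then PySem.Set.add c (min i j, max i j) else c) c) PySem.Set.empty
  let st := frontier.foldl
    (fun (st : PySem.Set (Int × Int) × List (Int × Int)) i =>
      (PySem.List.pyRange 0 n 1).foldl (fun st j =>
        if i = j then st
        else if (min i j, max i j) ∈ st.1 then st
        else (PySem.Set.add st.1 (min i j, max i j), st.2 ++ [(min i j, max i j)])) st)
    (computed, ([] : List (Int × Int)))
  st.2

-- ===== PORT B =====
def enumerate_level4_pairs_alt (all_levels : List Int) : List (Int × Int) :=
  let n : Int := PySem.List.len all_levels
  let st := (PySem.List.enumerate all_levels).foldl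
    (fun (st : PySem.Set (Int × Int) × List (Int × Int)) pr =>
      if pr.2 ≠ 3 then st
      else (PySem.List.pyRange 0 n 1).foldl (fun st j =>
        if j = pr.1 ∨ PySem.List.pyGetD all_levels j 0 ≤ 0 then st
        else
          let p := if pr.1 < j then (pr.1, j) else (j, pr.1)
          if p ∈ st.1 then st
          else (PySem.Set.add st.1 p, st.2 ++ [p])) st)
    (PySem.Set.empty, ([] : List (Int × Int)))
  st.2

-- ===== PRECONDITION & SPEC =====
def Spec_enumerate_level4_pairs (all_levels : List Int) (out : List (Int × Int)) : Prop := out = enumerate_level4_pairs_alt all_levels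
instance (all_levels : List Int) (out : List (Int × Int)) : Decidable (Spec_enumerate_level4_pairs all_levels out) := by unfold Spec_enumerate_level4_pairs; infer_instance

-- ===== CLAIM (what is proved, stated in full; the proofs are below) =====
def Claim_equal_enumerate_level4_pairs : Prop := ∀ (all_levels : List Int), Dom_enumerate_level4_pairs all_levels → Spec_enumerate_level4_pairs all_levels (enumerate_level4_pairs all_levels)


-- ===== LEMMAS AND PROOFS =====

-- membership in A's prebuilt `computed` set
def InitP (lv : List Int) (p : Int × Int) : Prop :=
  0 ≤ p.1 ∧ p.1 < p.2 ∧ p.2 < (lv.length : Int) ∧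
  PySem.List.pyGetD lv p.1 0 + PySem.List.pyGetD lv p.2 0 ≤ 3

theorem mem_aInner (lv : List Int) (n i : Int) (c : PySem.Set (Int × Int)) (p : Int × Int) :
    p ∈ (PySem.List.pyRange (i+1) n 1).foldl (fun c j =>
        if PySem.List.pyGetD lv i 0 + PySem.List.pyGetD lv j 0 ≤ 3
        then PySem.Set.add c (min i j, max i j) else c) c
    ↔ p ∈ c ∨ ∃ j, i < j ∧ j < n ∧
        PySem.List.pyGetD lv i 0 + PySem.List.pyGetD lv j 0 ≤ 3 ∧ p = (i, j) := by
  rw [PySem.List.foldl_ite_eq_foldl_filter]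
  rw [show (fun (c : PySem.Set (Int × Int)) j => PySem.Set.add c (min i j, max i j))
      = (fun (c : PySem.Set (Int × Int)) j => PySem.Set.add c ((fun j => (min i j, max i j)) j)) from rfl]
  rw [PySem.Set.mem_foldl_add]
  simp only [List.mem_filter, PySem.List.mem_pyRange_one, decide_eq_true_eq]
  constructor
  · rintro (h | ⟨j, ⟨⟨hj1, hj2⟩, hle⟩, rfl⟩)
    · exact Or.inl h
    · exact Or.inr ⟨j, by omega, hj2, hle, by rw [min_eq_left (by omega), max_eq_right (by omega)]⟩
  · rintro (h | ⟨j, hj1, hj2, hle, rfl⟩)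
    · exact Or.inl h
    · exact Or.inr ⟨j, ⟨⟨by omega, hj2⟩, hle⟩, by rw [min_eq_left (by omega), max_eq_right (by omega)]⟩

theorem mem_outer (lv : List Int) (n : Int) : ∀ (l : List Int) (c : PySem.Set (Int × Int)) (p : Int × Int),
    p ∈ l.foldl (fun c i =>
      (PySem.List.pyRange (i+1) n 1).foldl (fun c j =>
        if PySem.List.pyGetD lv i 0 + PySem.List.pyGetD lv j 0 ≤ 3
        then PySem.Set.add c (min i j, max i j) else c) c) c
    ↔ p ∈ c ∨ ∃ i ∈ l, ∃ j, i < j ∧ j < n ∧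
        PySem.List.pyGetD lv i 0 + PySem.List.pyGetD lv j 0 ≤ 3 ∧ p = (i, j) := by
  intro l
  induction l with
  | nil => simp
  | cons a l ih =>
    intro c p
    rw [List.foldl_cons, ih, mem_aInner]
    simp only [List.mem_cons]
    constructor
    · rintro ((h | ⟨j, h⟩) | ⟨i, hi, h⟩)
      · exact Or.inl h
      · exact Or.inr ⟨a, Or.inl rfl, j, h⟩
      · exact Or.inr ⟨i, Or.inr hi, h⟩
    · rintro (h | ⟨i, (rfl | hi), h⟩)
      · exact Or.inl (Or.inl h)
      · obtain ⟨j, h⟩ := h; exact Or.inl (Or.inr ⟨j, h⟩)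
      · exact Or.inr ⟨i, hi, h⟩

theorem mem_computed (lv : List Int) (p : Int × Int) :
    p ∈ (PySem.List.pyRange 0 (lv.length : Int) 1).foldl (fun c i =>
      (PySem.List.pyRange (i+1) (lv.length : Int) 1).foldl (fun c j =>
        if PySem.List.pyGetD lv i 0 + PySem.List.pyGetD lv j 0 ≤ 3
        then PySem.Set.add c (min i j, max i j) else c) c) PySem.Set.empty
    ↔ InitP lv p := by
  rw [mem_outer]
  simp only [PySem.List.mem_pyRange_one, InitP]
  constructor
  · rintro (h | ⟨i, ⟨hi0, hin⟩, j, hij, hjn, hle, rfl⟩)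
    · simp [PySem.Set.empty] at h
    · exact ⟨hi0, hij, hjn, hle⟩
  · rintro ⟨h1, h2, h3, h4⟩
    exact Or.inr ⟨p.1, ⟨h1, by omega⟩, p.2, h2, h3, h4, rfl⟩

theorem initP_canon (lv : List Int) (i j : Int) (hi0 : 0 ≤ i) (hin : i < (lv.length : Int))
    (hj0 : 0 ≤ j) (hjn : j < (lv.length : Int)) (hne : i ≠ j)
    (hlv : PySem.List.pyGetD lv i 0 = 3) :
    (InitP lv (min i j, max i j) ↔ PySem.List.pyGetD lv j 0 ≤ 0) := by
  unfold InitP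
  rcases lt_or_gt_of_ne hne with h | h
  · rw [min_eq_left h.le, max_eq_right h.le]
    simp only []
    rw [hlv]
    constructor
    · rintro ⟨-, -, -, h4⟩; omega
    · intro hle; exact ⟨hi0, h, hjn, by omega⟩
  · rw [min_eq_right h.le, max_eq_left h.le]
    simp only []
    rw [hlv]
    constructor
    · rintro ⟨-, -, -, h4⟩; omega
    · intro hle; exact ⟨hj0, h, hin, by omega⟩

theorem canon_eq (i j : Int) :
    (if i < j then ((i, j) : Int × Int) else (j, i)) = (min i j, max i j) := by
  split_ifs with hlt
  · rw [min_eq_left hlt.le, max_eq_right hlt.le]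
  · rw [min_eq_right (by omega), max_eq_left (by omega)]

theorem main_inner (lv : List Int) (i : Int) (hi0 : 0 ≤ i) (hin : i < (lv.length : Int))
    (hlv : PySem.List.pyGetD lv i 0 = 3) :
    ∀ (js : List Int), (∀ j ∈ js, 0 ≤ j ∧ j < (lv.length : Int)) →
    ∀ (c s : PySem.Set (Int × Int)) (acc : List (Int × Int)),
    (∀ p, p ∈ c ↔ InitP lv p ∨ p ∈ s) →
    (js.foldl (fun (st : PySem.Set (Int × Int) × List (Int × Int)) j =>
        if i = j then st
        else if (min i j, max i j) ∈ st.1 then st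
        else (PySem.Set.add st.1 (min i j, max i j), st.2 ++ [(min i j, max i j)])) (c, acc)).2
      = (js.foldl (fun (st : PySem.Set (Int × Int) × List (Int × Int)) j =>
        if j = i ∨ PySem.List.pyGetD lv j 0 ≤ 0 then st
        else
          let p := if i < j then (i, j) else (j, i)
          if p ∈ st.1 then st
          else (PySem.Set.add st.1 p, st.2 ++ [p])) (s, acc)).2
    ∧ ∀ p, p ∈ (js.foldl (fun (st : PySem.Set (Int × Int) × List (Int × Int)) j =>
        if i = j then st
        else if (min i j, max i j) ∈ st.1 then st
        else (PySem.Set.add st.1 (min i j, max i j), st.2 ++ [(min i j, max i j)])) (c, acc)).1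
      ↔ InitP lv p ∨ p ∈ (js.foldl (fun (st : PySem.Set (Int × Int) × List (Int × Int)) j =>
        if j = i ∨ PySem.List.pyGetD lv j 0 ≤ 0 then st
        else
          let p := if i < j then (i, j) else (j, i)
          if p ∈ st.1 then st
          else (PySem.Set.add st.1 p, st.2 ++ [p])) (s, acc)).1 := by
  intro js
  induction js with
  | nil => intro _ c s acc hinv; exact ⟨rfl, hinv⟩
  | cons j js ih =>
    intro hjs c s acc hinv
    obtain ⟨hj0, hjn⟩ := hjs j (List.mem_cons_self)
    have hjs' := fun j hj => hjs j (List.mem_cons_of_mem _ hj)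
    simp only [List.foldl_cons]
    by_cases hij : i = j
    · rw [if_pos hij, if_pos (Or.inl hij.symm)]
      exact ih hjs' c s acc hinv
    · rw [if_neg hij]
      have hI := initP_canon lv i j hi0 hin hj0 hjn hij hlv
      have hc := canon_eq i j
      by_cases hle : PySem.List.pyGetD lv j 0 ≤ 0
      · rw [if_pos (Or.inr hle)]
        rw [if_pos ((hinv _).2 (Or.inl (hI.2 hle)))]
        exact ih hjs' c s acc hinv
      · have hBg : ¬(j = i ∨ PySem.List.pyGetD lv j 0 ≤ 0) := by
          rintro (h | h)
          · exact hij h.symm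
          · exact hle h
        rw [if_neg hBg]
        simp only [hc]
        by_cases hmem : ((min i j, max i j) : Int × Int) ∈ s
        · rw [if_pos ((hinv _).2 (Or.inr hmem)), if_pos hmem]
          exact ih hjs' c s acc hinv
        · have hAc : ((min i j, max i j) : Int × Int) ∉ c := by
            rw [hinv]
            rintro (h | h)
            · exact hle (hI.1 h)
            · exact hmem h
          rw [if_neg hAc, if_neg hmem]
          refine ih hjs' _ _ _ ?_
          intro p
          simp only [PySem.Set.mem_add, hinv p]
          tauto

theorem main_outer (lv : List Int) : ∀ (L : List (Int × Int)),
    (∀ pr ∈ L, 0 ≤ pr.1 ∧ pr.1 < (lv.length : Int) ∧ PySem.List.pyGetD lv pr.1 0 = 3) →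
    ∀ (c s : PySem.Set (Int × Int)) (acc : List (Int × Int)),
    (∀ p, p ∈ c ↔ InitP lv p ∨ p ∈ s) →
    (L.foldl (fun (st : PySem.Set (Int × Int) × List (Int × Int)) pr =>
        (PySem.List.pyRange 0 (lv.length : Int) 1).foldl (fun st j =>
          if pr.1 = j then st
          else if (min pr.1 j, max pr.1 j) ∈ st.1 then st
          else (PySem.Set.add st.1 (min pr.1 j, max pr.1 j), st.2 ++ [(min pr.1 j, max pr.1 j)])) st) (c, acc)).2
      = (L.foldl (fun (st : PySem.Set (Int × Int) × List (Int × Int)) pr =>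
        (PySem.List.pyRange 0 (lv.length : Int) 1).foldl (fun st j =>
          if j = pr.1 ∨ PySem.List.pyGetD lv j 0 ≤ 0 then st
          else
            let p := if pr.1 < j then (pr.1, j) else (j, pr.1)
            if p ∈ st.1 then st
            else (PySem.Set.add st.1 p, st.2 ++ [p])) st) (s, acc)).2 := by
  intro L
  induction L with
  | nil => intro _ c s acc _; rfl
  | cons pr L ihL =>
    intro hL c s acc hinv
    obtain ⟨h1, h2, h3⟩ := hL pr (List.mem_cons_self)
    have hjs : ∀ j ∈ PySem.List.pyRange 0 (lv.length : Int) 1, 0 ≤ j ∧ j < (lv.length : Int) := by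
      intro j hj; rw [PySem.List.mem_pyRange_one] at hj; exact hj
    obtain ⟨hacc, hinv'⟩ := main_inner lv pr.1 h1 h2 h3 _ hjs c s acc hinv
    simp only [List.foldl_cons]
    rw [← Prod.mk.eta (p := (PySem.List.pyRange 0 (lv.length : Int) 1).foldl _ (c, acc)),
        ← Prod.mk.eta (p := (PySem.List.pyRange 0 (lv.length : Int) 1).foldl _ (s, acc)),
        hacc]
    exact ihL (fun q hq => hL q (List.mem_cons_of_mem _ hq)) _ _ _ hinv'

-- ===== VERDICT (by name: the statement is the Claim_ definition above) =====
theorem enumerate_level4_pairs_spec : Claim_equal_enumerate_level4_pairs := by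
  intro lv _
  unfold Spec_enumerate_level4_pairs
  simp only [enumerate_level4_pairs, enumerate_level4_pairs_alt, PySem.List.len_eq]
  rw [List.foldl_map]
  simp only [ne_eq, ite_not]
  rw [PySem.List.foldl_ite_eq_foldl_filter]
  have hfil : ((PySem.List.enumerate lv).filter (fun p => p.2 == 3))
      = ((PySem.List.enumerate lv).filter (fun pr => decide (pr.2 = 3))) := by
    apply List.filter_congr
    intro p _
    rfl
  rw [← hfil]
  apply main_outer
  · intro pr hpr
    rw [List.mem_filter] at hpr
    obtain ⟨hmem, hpred⟩ := hpr
    rw [PySem.List.mem_enumerate_iff] at hmem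
    obtain ⟨k, hk, rfl⟩ := hmem
    simp only [zero_add] at hpred ⊢
    have h3 : lv[k] = 3 := by simpa using hpred
    refine ⟨Int.natCast_nonneg k, by exact_mod_cast hk, ?_⟩
    rw [PySem.List.pyGetD_natCast, List.getD_eq_getElem _ _ hk, h3]
  · intro p
    rw [mem_computed]
    simp [PySem.Set.empty]
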